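-- pv_equiv track=rewrite | github.com/p0ss/HatCatDev | src/training/train_pending_lenses.py | collect_pending_by_layer
-- ===== SOURCE A (Python) =====
-- from typing import Dict, List, Set
--
-- def collect_pending_by_layer(
--     pending: Dict,
--     concept_to_layer: Dict[str, int],
--     include_should_retrain: bool = False
-- ) -> Dict[int, List[str]]:
--     """Organize pending concepts by layer."""
--     by_layer: Dict[int, Set[str]] = {}
--
--     pending_concepts = pending.get("pending_concepts", [])
--
--     for concept in pending_concepts:
--         layer = concept_to_layer.get(concept)
--         if layer is not None:
--             if layer not in by_layer:
--                 by_layer[layer] = set()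
--             by_layer[layer].add(concept)
--
--     return {layer: sorted(concepts) for layer, concepts in by_layer.items()}
-- ===== SOURCE B (Python) =====
-- def collect_pending_by_layer(
--     pending,
--     concept_to_layer,
--     include_should_retrain=False,
-- ):
--     """Organize pending concepts by layer (two-pass group-by)."""
--     pcs = pending.get("pending_concepts", [])
--     layers = []
--     for c in pcs:
--         l = concept_to_layer.get(c)
--         if l is not None and l not in layers:
--             layers.append(l)
--     return {l: sorted({c for c in pcs if concept_to_layer.get(c) == l})
--             for l in layers}
-- ===== Notes on version B (the rewrite author's own statement) =====
-- stated objective: alternative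
-- what changed: A buckets concepts into per-layer sets in one pass and sorts each set at the end; B first collects the distinct layers in first-appearance order, then builds each layer's sorted list by filtering the concept list per layer.
import Mathlib
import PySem

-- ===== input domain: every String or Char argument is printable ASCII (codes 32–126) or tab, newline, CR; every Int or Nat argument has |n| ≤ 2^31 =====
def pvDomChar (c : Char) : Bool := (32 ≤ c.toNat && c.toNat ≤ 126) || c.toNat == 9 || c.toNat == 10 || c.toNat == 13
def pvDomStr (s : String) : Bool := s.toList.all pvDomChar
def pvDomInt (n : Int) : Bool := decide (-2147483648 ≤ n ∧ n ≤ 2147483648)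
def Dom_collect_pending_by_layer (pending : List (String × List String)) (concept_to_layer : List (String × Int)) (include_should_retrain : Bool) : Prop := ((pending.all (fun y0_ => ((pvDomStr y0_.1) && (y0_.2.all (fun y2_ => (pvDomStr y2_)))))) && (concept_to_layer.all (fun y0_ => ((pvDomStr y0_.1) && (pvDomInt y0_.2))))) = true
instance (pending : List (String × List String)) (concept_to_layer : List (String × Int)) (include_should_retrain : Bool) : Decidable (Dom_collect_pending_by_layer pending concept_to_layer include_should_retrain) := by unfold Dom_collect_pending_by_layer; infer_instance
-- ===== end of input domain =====

-- B replaces A's single-pass set-bucketing (per-layer sets, then a final sort of each) by a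
-- two-pass group-by: collect the distinct layers in first-appearance order, then build each
-- layer's sorted list by filtering the concept list — objective: alternative decomposition.

-- ===== PORT A =====
-- A's loop body as a named helper (the step of the 'for concept in pending_concepts' loop).
def pvStepA (ctld : PySem.Dict String Int) (d : PySem.Dict Int (PySem.Set String)) (concept : String) : PySem.Dict Int (PySem.Set String) :=
  match ctld.get? concept with
  | none => d
  | some layer =>
    let d := if d.contains layer then d else d.insert layer PySem.Set.empty
    d.modify layer PySem.Set.empty (fun s => PySem.Set.add s concept)

def collect_pending_by_layer (pending : List (String × List String)) (concept_to_layer : List (String × Int)) (include_should_retrain : Bool) : List (Int × List String) :=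
  let ctld := PySem.Dict.ofList concept_to_layer
  let pending_concepts := (PySem.Dict.ofList pending).getD "pending_concepts" []
  let by_layer : PySem.Dict Int (PySem.Set String) :=
    pending_concepts.foldl (pvStepA ctld) PySem.Dict.empty
  by_layer.items.map (fun p => (p.1, PySem.List.sorted p.2 (fun x => x) false))

-- ===== PORT B =====
def collect_pending_by_layer_alt (pending : List (String × List String)) (concept_to_layer : List (String × Int)) (include_should_retrain : Bool) : List (Int × List String) :=
  let ctld := PySem.Dict.ofList concept_to_layer
  let pcs := (PySem.Dict.ofList pending).getD "pending_concepts" []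
  let layers : List Int :=
    pcs.foldl (fun ls c =>
      match ctld.get? c with
      | none => ls
      | some l => if l ∈ ls then ls else ls ++ [l]) []
  layers.map (fun l =>
    (l, PySem.List.sorted (PySem.Set.ofList (pcs.filter (fun c => ctld.get? c == some l))) (fun x => x) false))

-- ===== PRECONDITION & SPEC =====
def Spec_collect_pending_by_layer (pending : List (String × List String)) (concept_to_layer : List (String × Int)) (include_should_retrain : Bool) (out : List (Int × List String)) : Prop := out = collect_pending_by_layer_alt pending concept_to_layer include_should_retrain
instance (pending : List (String × List String)) (concept_to_layer : List (String × Int)) (include_should_retrain : Bool) (out : List (Int × List String)) : Decidable (Spec_collect_pending_by_layer pending concept_to_layer include_should_retrain out) := by unfold Spec_collect_pending_by_layer; infer_instance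

-- ===== CLAIM (what is proved, stated in full; the proofs are below) =====
def Claim_equal_collect_pending_by_layer : Prop := ∀ (pending : List (String × List String)) (concept_to_layer : List (String × Int)) (include_should_retrain : Bool), Dom_collect_pending_by_layer pending concept_to_layer include_should_retrain → Spec_collect_pending_by_layer pending concept_to_layer include_should_retrain (collect_pending_by_layer pending concept_to_layer include_should_retrain)

-- ===== LEMMAS AND PROOFS =====

-- Characterisation of A's loop: keys accumulate like Set.add over the mapped layers,
-- and the value at each layer accumulates the concepts that map to it.
-- Characterisation of A's loop: keys accumulate like Set.add over the mapped layers,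
-- and the value at each layer accumulates the concepts that map to it.
lemma pvLoopA (ctld : PySem.Dict String Int) (pcs : List String) :
    ∀ d : PySem.Dict Int (PySem.Set String),
      (pcs.foldl (pvStepA ctld) d).keys
        = (pcs.filterMap ctld.get?).foldl PySem.Set.add d.keys
      ∧ ∀ l : Int, (pcs.foldl (pvStepA ctld) d).getD l PySem.Set.empty
        = (pcs.filter (fun c => ctld.get? c == some l)).foldl PySem.Set.add (d.getD l PySem.Set.empty) := by
  induction pcs with
  | nil => intro d; exact ⟨rfl, fun l => rfl⟩
  | cons c rest ih =>
    intro d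
    have hstep_keys : (pvStepA ctld d c).keys =
        match ctld.get? c with
        | none => d.keys
        | some l => PySem.Set.add d.keys l := by
      unfold pvStepA
      cases h : ctld.get? c with
      | none => rfl
      | some l =>
        simp only []
        by_cases hc : d.contains l = true
        · rw [if_pos hc, PySem.Dict.keys_modify, PySem.Dict.keys_insert_of_contains d _ hc,
              PySem.Set.add_of_mem ((PySem.Dict.contains_iff_mem_keys d l).mp hc)]
        · rw [if_neg hc, PySem.Dict.keys_modify, PySem.Dict.insert_insert_self,
              PySem.Dict.keys_insert_of_not_contains d _ (by simpa using hc),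
              PySem.Set.add_of_not_mem (fun hm => hc ((PySem.Dict.contains_iff_mem_keys d l).mpr hm))]
    have hstep_getD : ∀ l : Int, (pvStepA ctld d c).getD l PySem.Set.empty =
        if ctld.get? c == some l then PySem.Set.add (d.getD l PySem.Set.empty) c
        else d.getD l PySem.Set.empty := by
      intro l
      unfold pvStepA
      cases h : ctld.get? c with
      | none => simp
      | some l' =>
        simp only []
        by_cases hl : l = l'
        · subst hl
          simp only [beq_self_eq_true, if_true]
          by_cases hc : d.contains l = true
          · rw [if_pos hc, PySem.Dict.getD_modify_self]
          · rw [if_neg hc, PySem.Dict.getD_modify_self, PySem.Dict.getD_insert_self,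
                PySem.Dict.getD_of_not_contains d _ (by simpa using hc)]
        · have hne : (some l' == some l) = false := by
            simp only [beq_eq_false_iff_ne, ne_eq, Option.some.injEq]
            exact fun h' => hl h'.symm
          have hmain : ((if d.contains l' then d else d.insert l' PySem.Set.empty).modify l'
              PySem.Set.empty (fun s => PySem.Set.add s c)).getD l PySem.Set.empty
              = d.getD l PySem.Set.empty := by
            by_cases hc : d.contains l' = true
            · rw [if_pos hc, PySem.Dict.getD_modify_of_ne d _ _ hl]
            · rw [if_neg hc, PySem.Dict.getD_modify_of_ne _ _ _ hl,
                  PySem.Dict.getD_insert_of_ne d _ _ hl]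
          rw [hmain, hne, if_neg (by simp)]
    obtain ⟨ihk, ihv⟩ := ih (pvStepA ctld d c)
    constructor
    · rw [List.foldl_cons, ihk, hstep_keys]
      cases h : ctld.get? c with
      | none => simp [h]
      | some l => simp [h]
    · intro l
      rw [List.foldl_cons, ihv l, hstep_getD l]
      by_cases h : ctld.get? c == some l
      · simp only [List.filter_cons, h]
        simp
      · simp only [List.filter_cons]
        rw [if_neg h]
        simp [h]

-- B's layer-collecting loop is Set.add over the mapped layers.
lemma pvLoopB (ctld : PySem.Dict String Int) (pcs : List String) :
    ∀ ls : List Int,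
      pcs.foldl (fun ls c =>
        match ctld.get? c with
        | none => ls
        | some l => if l ∈ ls then ls else ls ++ [l]) ls
      = (pcs.filterMap ctld.get?).foldl PySem.Set.add ls := by
  induction pcs with
  | nil => intro ls; rfl
  | cons c rest ih =>
    intro ls
    cases h : ctld.get? c with
    | none => simp only [List.foldl_cons, h, List.filterMap_cons]; rw [ih]
    | some l =>
      simp only [List.foldl_cons, h, List.filterMap_cons]
      rw [ih]
      congr 1
      rw [PySem.Set.add_eq_ite]

-- ===== VERDICT (by name: the statement is the Claim_ definition above) =====
theorem collect_pending_by_layer_spec : Claim_equal_collect_pending_by_layer := by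
  intro pending concept_to_layer include_should_retrain _
  unfold Spec_collect_pending_by_layer collect_pending_by_layer collect_pending_by_layer_alt
  simp only []
  set ctld := PySem.Dict.ofList concept_to_layer with hctld
  set pcs := (PySem.Dict.ofList pending).getD "pending_concepts" [] with hpcs
  obtain ⟨hkeys, hvals⟩ := pvLoopA ctld pcs PySem.Dict.empty
  set byl := pcs.foldl (pvStepA ctld) PySem.Dict.empty with hbyl
  have hkeys' : byl.keys = (pcs.filterMap ctld.get?).foldl PySem.Set.add [] := by
    simpa [PySem.Dict.keys_empty] using hkeys
  have hnodup : byl.keys.Nodup := by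
    rw [hkeys', ← PySem.Set.ofList_eq_foldl]
    exact PySem.Set.nodup_ofList _
  have hitems : byl.items = byl.keys.map (fun k => (k, byl.getD k PySem.Set.empty)) :=
    PySem.Dict.items_eq_map_keys byl hnodup PySem.Set.empty
  have hlayers : (pcs.foldl (fun ls c =>
        match ctld.get? c with
        | none => ls
        | some l => if l ∈ ls then ls else ls ++ [l]) ([] : List Int)) = byl.keys := by
    rw [pvLoopB, hkeys']
  rw [hitems, hlayers, List.map_map]
  apply List.map_congr_left
  intro l _
  simp only [Function.comp]
  congr 1
  rw [hvals l]
  simp [PySem.Dict.getD_empty, PySem.Set.ofList_eq_foldl]
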